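-- pv_equiv track=rewrite | github.com/Massprod/leetcode-testing | leetcode_problems/p1218_longest_arithmetic_subsequence_of_given_difference.py | longest_subsequence_length
-- ===== SOURCE A (Python) =====
-- def longest_subsequence_length(arr: list[int], difference: int) -> int:
--     # working_sol (50.00%, 92.84%) -> (575ms, 30mb)  time: O(n) | space: O(n)
--     stored: dict[int, int] = {}
--     for x in range(len(arr) - 1, -1, -1):
--         num: int = arr[x]
--         # first encounter
--         if num not in stored:
--             stored[num] = 1
--             # unique case with duplicates
--             if difference == 0:
--                 continue
--         if x < (len(arr) - 1):
--             alr_met: int = num + difference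
--             # correct option we already met and stored its sequence_len,
--             # NUM seq is NUM itself, so we can use it as continuation
--             if alr_met in stored:
--                 stored[num] = stored[alr_met] + 1
--     max_len: int = max(stored.values())
--     return max_len
-- ===== SOURCE B (Python) =====
-- def longest_subsequence_length(arr: list[int], difference: int) -> int:
--     # Materialize the chains as a successor-pointer forest over indices:
--     # nxt[i] = first index j > i with arr[j] == arr[i] + difference (else -1),
--     # then compute chain lengths along the forest and take the maximum.
--     n = len(arr)
--     nxt = [-1] * n
--     first_at = {}  # value -> earliest index of that value seen so far (scanning right-to-left)
--     for i in range(n - 1, -1, -1):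
--         nxt[i] = first_at.get(arr[i] + difference, -1)
--         first_at[arr[i]] = i
--     clen = [0] * n
--     for i in range(n - 1, -1, -1):
--         j = nxt[i]
--         clen[i] = 1 + (clen[j] if j >= 0 else 0)
--     return max(clen)
-- ===== Notes on version B (the rewrite author's own statement) =====
-- stated objective: alternative
-- what changed: Replaces A's single backward value-keyed dict DP (stored[num]=stored[num+difference]+1 with first-encounter/continue/last-index branches) by an explicit successor-pointer forest over indices: one pass builds nxt[i] = first index after i holding arr[i]+difference, a second pass computes per-index chain lengths along that forest in an array, and the answer is the max of those lengths.
import Mathlib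
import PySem

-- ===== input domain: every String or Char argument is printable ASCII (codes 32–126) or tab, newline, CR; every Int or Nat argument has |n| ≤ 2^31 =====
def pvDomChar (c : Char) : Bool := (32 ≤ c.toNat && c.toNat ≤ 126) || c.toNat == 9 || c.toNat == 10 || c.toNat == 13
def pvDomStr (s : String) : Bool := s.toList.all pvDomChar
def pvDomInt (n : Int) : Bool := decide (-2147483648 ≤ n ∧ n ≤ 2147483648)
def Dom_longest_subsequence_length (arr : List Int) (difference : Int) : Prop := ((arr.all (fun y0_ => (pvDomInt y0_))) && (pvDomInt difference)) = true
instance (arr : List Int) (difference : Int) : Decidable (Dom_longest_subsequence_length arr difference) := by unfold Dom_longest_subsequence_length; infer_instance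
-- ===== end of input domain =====

-- B replaces A's backward value-keyed dict DP (stored[num] = stored[num+difference] + 1 with
-- first-encounter/continue/last-index branches) by an explicit successor-pointer forest over
-- indices: one pass builds nxt[i] = first index after i holding arr[i] + difference, a second
-- pass computes per-index chain lengths along the forest, and the answer is their maximum.

-- ===== PORT A =====
def longest_subsequence_length (arr : List Int) (difference : Int) : Int :=
  let stored : PySem.Dict Int Int :=
    (PySem.List.pyRange (PySem.List.len arr - 1) (-1) (-1)).foldl
      (fun stored x =>
        let num : Int := PySem.List.pyGetD arr x 0
        if !(stored.contains num) then
          let stored := stored.insert num 1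
          -- 'continue' when difference == 0
          if difference == 0 then stored
          else if x < PySem.List.len arr - 1 then
            let alr_met : Int := num + difference
            if stored.contains alr_met then stored.insert num (stored.getD alr_met 0 + 1)
            else stored
          else stored
        else
          if x < PySem.List.len arr - 1 then
            let alr_met : Int := num + difference
            if stored.contains alr_met then stored.insert num (stored.getD alr_met 0 + 1)
            else stored
          else stored)
      PySem.Dict.empty
  -- max(stored.values()); total via getD under Pre_ (arr ≠ [])
  (PySem.List.max? stored.values (fun v => v)).getD 0

-- ===== PORT B =====
def longest_subsequence_length_alt (arr : List Int) (difference : Int) : Int :=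
  let n : Int := PySem.List.len arr
  -- phase 1: nxt[i] = first_at.get(arr[i] + difference, -1); first_at[arr[i]] = i
  let p1 : List Int × PySem.Dict Int Int :=
    (PySem.List.pyRange (n - 1) (-1) (-1)).foldl
      (fun st i =>
        let num : Int := PySem.List.pyGetD arr i 0
        (st.1.set i.toNat (st.2.getD (num + difference) (-1)), st.2.insert num i))
      (List.replicate arr.length (-1), PySem.Dict.empty)
  let nxt : List Int := p1.1
  -- phase 2: clen[i] = 1 + (clen[j] if j >= 0 else 0) where j = nxt[i]
  let clen : List Int :=
    (PySem.List.pyRange (n - 1) (-1) (-1)).foldl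
      (fun cl i =>
        let j : Int := PySem.List.pyGetD nxt i (-1)
        cl.set i.toNat (1 + (if 0 ≤ j then PySem.List.pyGetD cl j 0 else 0)))
      (List.replicate arr.length 0)
  -- max(clen); total via getD under Pre_ (arr ≠ [])
  (PySem.List.max? clen (fun v => v)).getD 0

-- ===== PRECONDITION & SPEC =====
-- Python A raises ValueError (max of an empty dict) exactly when arr is empty.
def Pre_longest_subsequence_length (arr : List Int) (difference : Int) : Prop := arr ≠ []
instance (arr : List Int) (difference : Int) : Decidable (Pre_longest_subsequence_length arr difference) := by unfold Pre_longest_subsequence_length; infer_instance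
def pvWitness_longest_subsequence_length : List Int × Int := ([1, 2, 4], 1)

def Spec_longest_subsequence_length (arr : List Int) (difference : Int) (out : Int) : Prop := out = longest_subsequence_length_alt arr difference
instance (arr : List Int) (difference : Int) (out : Int) : Decidable (Spec_longest_subsequence_length arr difference out) := by unfold Spec_longest_subsequence_length; infer_instance

-- ===== CLAIM (what is proved, stated in full; the proofs are below) =====
def Claim_equal_longest_subsequence_length : Prop := ∀ (arr : List Int) (difference : Int), Dom_longest_subsequence_length arr difference → Pre_longest_subsequence_length arr difference → Spec_longest_subsequence_length arr difference (longest_subsequence_length arr difference)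

-- ===== LEMMAS AND PROOFS =====

/-- `S d l v` = length of the greedy chain through `l`: consume the first occurrence of `v`,
then continue with `v + d`. Both programs' stored lengths are instances of `S`. -/
def S (d : Int) : List Int → Int → Nat
  | [], _ => 0
  | a :: l, v => if a = v then S d l (v + d) + 1 else S d l v

theorem S_le_succ (d : Int) (l : List Int) (v : Int) : S d l v ≤ S d l (v + d) + 1 := by
  induction l generalizing v with
  | nil => simp [S]
  | cons a t ih =>
    by_cases h1 : a = v
    · subst h1
      by_cases h2 : a = a + d
      · simp [S, ← h2]
      · simp [S, h2]
    · by_cases h2 : a = v + d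
      · subst h2
        simp only [S, h1, if_false]
        calc S d t v ≤ S d t (v + d) + 1 := ih v
          _ ≤ (S d t (v + d + d) + 1) + 1 := by have := ih (v + d); omega
      · simp only [S, h1, h2, if_false]
        exact ih v

theorem one_le_S_iff (d : Int) (l : List Int) (v : Int) : 1 ≤ S d l v ↔ v ∈ l := by
  induction l generalizing v with
  | nil => simp [S]
  | cons a t ih =>
    by_cases h : a = v
    · subst h; simp [S]
    · simp [S, h, ih, Ne.symm h]

theorem S_eq_zero_of_not_mem (d : Int) (l : List Int) (v : Int) (h : v ∉ l) : S d l v = 0 := by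
  have h2 := (one_le_S_iff d l v).not.mpr h
  omega

theorem S_exists_chain (d : Int) (l : List Int) (v : Int) (hv : v ∈ l) :
    ∃ c : List Int, c.Sublist l ∧ c.IsChain (fun a b => b = a + d) ∧
      c.head? = some v ∧ c.length = S d l v := by
  induction l generalizing v with
  | nil => simp at hv
  | cons a t ih =>
    by_cases h : a = v
    · subst h
      simp only [S, if_pos]
      by_cases hm : (a + d) ∈ t
      · obtain ⟨c, hs, hc, hh, hl⟩ := ih (a + d) hm
        cases c with
        | nil => simp at hh
        | cons b c' =>
          simp only [List.head?_cons, Option.some.injEq] at hh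
          refine ⟨a :: b :: c', hs.cons₂ a, ?_, rfl, by simp [hl.symm]⟩
          exact List.isChain_cons_cons.mpr ⟨by omega, hc⟩
      · refine ⟨[a], (List.nil_sublist t).cons₂ a, by simp, rfl, ?_⟩
        simp [S_eq_zero_of_not_mem d t _ hm]
    · have hv' : v ∈ t := by cases hv with
        | head => exact absurd rfl h
        | tail _ hmem => exact hmem
      obtain ⟨c, hs, hc, hh, hl⟩ := ih v hv'
      exact ⟨c, hs.cons a, hc, hh, by simp [S, h, hl]⟩

theorem S_ge_chain (d : Int) (l : List Int) (c : List Int) (v : Int)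
    (hs : c.Sublist l) (hc : c.IsChain (fun a b => b = a + d)) (hh : c.head? = some v) :
    c.length ≤ S d l v := by
  induction l generalizing c v with
  | nil =>
    have : c = [] := List.sublist_nil.mp hs
    subst this; simp at hh
  | cons a t ih =>
    cases hs with
    | cons _ hs' =>
      have hle := ih c v hs' hc hh
      by_cases h : a = v
      · subst h
        have := S_le_succ d t a
        simp [S]; omega
      · simpa [S, h] using hle
    | cons₂ _ hs' =>
      rename_i c'
      have hv : a = v := by simpa using hh
      subst hv
      simp only [S, if_pos]
      cases c' with
      | nil => simp
      | cons b c'' =>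
        rw [List.isChain_cons_cons] at hc
        have hb : b = a + d := hc.1
        have := ih (b :: c'') (a + d) hs' hc.2 (by simp [hb])
        simpa using this

-- Dict built by A's backward pass: value lookups are `S` on the suffix.
def Hdp (d : Int) : List Int → PySem.Dict Int Int
  | [] => PySem.Dict.empty
  | a :: s => (Hdp d s).insert a ((Hdp d s).getD (a + d) 0 + 1)

theorem Hdp_getD (d : Int) (s : List Int) (v : Int) :
    (Hdp d s).getD v 0 = (S d s v : Int) := by
  induction s generalizing v with
  | nil => simp [Hdp, S, PySem.Dict.getD_empty]
  | cons a t ih =>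
    rw [Hdp, PySem.Dict.getD_insert]
    by_cases h : v = a
    · subst h; simp [S, ih]
    · simp [S, Ne.symm h, h, ih]

theorem Hdp_mem_keys (d : Int) (s : List Int) (v : Int) :
    v ∈ (Hdp d s).keys ↔ v ∈ s := by
  induction s with
  | nil => simp [Hdp, PySem.Dict.keys_empty]
  | cons a t ih => rw [Hdp]; simp [PySem.Dict.mem_keys_insert, ih]

theorem Hdp_nodup (d : Int) (s : List Int) : (Hdp d s).keys.Nodup := by
  induction s with
  | nil => simp [Hdp, PySem.Dict.keys_empty]
  | cons a t ih => exact PySem.Dict.nodup_keys_insert _ _ _ ih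

theorem dict_insert_eq_self (dd : PySem.Dict Int Int) (k v : Int)
    (hnd : dd.keys.Nodup) (h : dd.get? k = some v) : dd.insert k v = dd := by
  apply PySem.Dict.ext
  have hcont : dd.contains k = true := by
    rw [PySem.Dict.contains_eq_isSome_get? dd k, h]; rfl
  rw [PySem.Dict.items_insert_of_contains dd v hcont]
  have hkv : (k, v) ∈ dd.items := PySem.Dict.mem_items_of_get?_eq_some dd h
  have hnd' : (dd.items.map Prod.fst).Nodup := by
    simpa [PySem.Dict.keys] using hnd
  conv_rhs => rw [← List.map_id dd.items]
  apply List.map_congr_left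
  intro p hp
  by_cases hpk : p.1 = k
  · have : p = (k, v) :=
      List.inj_on_of_nodup_map hnd' hp hkv (by simpa using hpk)
    simp [this]
  · simp [hpk]

-- A's loop body, with the per-index data (`flag` = "x < len(arr)-1") abstracted out.
def stepExt (difference : Int) (st : PySem.Dict Int Int) (num : Int) : PySem.Dict Int Int :=
  if st.contains (num + difference) then st.insert num (st.getD (num + difference) 0 + 1) else st

def stepA (difference : Int) (flag : Prop) [Decidable flag]
    (st : PySem.Dict Int Int) (num : Int) : PySem.Dict Int Int :=
  if !(st.contains num) then
    let st' := st.insert num 1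
    if difference == 0 then st'
    else if flag then stepExt difference st' num else st'
  else if flag then stepExt difference st num else st

def G (difference : Int) : List Int → PySem.Dict Int Int
  | [] => PySem.Dict.empty
  | a :: s => stepA difference (s ≠ []) (G difference s) a

theorem G_eq_H (d : Int) (s : List Int) : G d s = Hdp d s := by
  induction s with
  | nil => rfl
  | cons a s ih =>
    rw [G, ih]
    have hk : ∀ w : Int, (Hdp d s).contains w = decide (w ∈ s) := fun w => by
      rw [PySem.Dict.contains_eq_decide_mem_keys]
      simp [Hdp_mem_keys]
    rw [stepA]
    by_cases hmem : a ∈ s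
    · have hne : s ≠ [] := List.ne_nil_of_mem hmem
      simp only [hk, hmem, decide_true, Bool.not_true, Bool.false_eq_true, if_false, if_pos hne]
      rw [stepExt]
      by_cases hext : (a + d) ∈ s
      · simp only [hk, hext, decide_true, if_true]
        rfl
      · simp only [hk, hext, decide_false, Bool.false_eq_true, if_false]
        -- here A keeps the dict; the stored value at a is already 1
        have hS1 : S d s a = 1 := by
          have h1 := (one_le_S_iff d s a).mpr hmem
          have h2 := S_le_succ d s a
          have h3 := S_eq_zero_of_not_mem d s (a + d) hext
          omega
        have hget : (Hdp d s).get? a = some 1 := by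
          have hc : (Hdp d s).contains a = true := by rw [hk]; simpa
          have := PySem.Dict.getD_eq_get?_getD (Hdp d s) a 0
          rw [Hdp_getD, hS1] at this
          rw [PySem.Dict.contains_eq_isSome_get?] at hc
          cases hgg : (Hdp d s).get? a with
          | none => rw [hgg] at hc; simp at hc
          | some w => rw [hgg] at this; simp at this; simp [← this]
        have hgd : (Hdp d s).getD (a + d) 0 = 0 := by
          rw [Hdp_getD, S_eq_zero_of_not_mem d s (a + d) hext]; rfl
        rw [Hdp, hgd]
        exact (dict_insert_eq_self (Hdp d s) a 1 (Hdp_nodup d s) hget).symm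
    · simp only [hk, hmem, decide_false, Bool.not_false, if_true]
      have hgd : (Hdp d s).getD (a + d) 0 = (S d s (a + d) : Int) := Hdp_getD d s (a + d)
      by_cases hd : d = 0
      · subst hd
        simp only [beq_self_eq_true, if_true]
        have : S 0 s (a + 0) = 0 := by
          rw [show a + (0:Int) = a by ring]
          exact S_eq_zero_of_not_mem 0 s a hmem
        rw [Hdp, hgd, this]
        norm_num
      · have hd' : (d == 0) = false := by simpa using hd
        simp only [hd', Bool.false_eq_true, if_false]
        by_cases hne : s = []
        · subst hne
          simp only [ne_eq, not_true_eq_false, if_false]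
          rw [Hdp]
          simp [Hdp, PySem.Dict.getD_empty]
        · simp only [hne, ne_eq, not_false_eq_true, if_true]
          rw [stepExt]
          have hca : ((Hdp d s).insert a 1).contains (a + d) = (Hdp d s).contains (a + d) := by
            rw [PySem.Dict.contains_insert]
            have : (a + d == a) = false := by simp; omega
            rw [this, Bool.false_or]
          by_cases hext : (a + d) ∈ s
          · rw [hca, hk]
            simp only [hext, decide_true, if_true]
            have hgd' : ((Hdp d s).insert a 1).getD (a + d) 0 = (Hdp d s).getD (a + d) 0 := by
              rw [PySem.Dict.getD_insert, if_neg (by omega)]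
            rw [hgd', PySem.Dict.insert_insert_self, Hdp]
          · rw [hca, hk]
            simp only [hext, decide_false, Bool.false_eq_true, if_false]
            rw [Hdp, hgd, S_eq_zero_of_not_mem d s (a + d) hext]
            rfl

-- fold congruence across two mapped index lists (A's indices into `a :: s` vs `s`'s own)
theorem foldl_map_congr {α β σ : Type} (l : List β) (f g : β → α) (F G : σ → α → σ) (init : σ)
    (h : ∀ st b, b ∈ l → F st (f b) = G st (g b)) :
    (l.map f).foldl F init = (l.map g).foldl G init := by
  induction l generalizing init with
  | nil => rfl
  | cons b t ih =>
    simp only [List.map_cons, List.foldl_cons]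
    rw [h init b (List.mem_cons_self ..)]
    exact ih _ (fun st b hb => h st b (List.mem_cons_of_mem _ hb))

-- Bridge: A's index-descending pyRange fold is the structural recursion G.
theorem fold_eq_G (d : Int) (arr : List Int) :
    (PySem.List.pyRange (PySem.List.len arr - 1) (-1) (-1)).foldl
      (fun stored x =>
        let num : Int := PySem.List.pyGetD arr x 0
        if !(stored.contains num) then
          let stored := stored.insert num 1
          if d == 0 then stored
          else if x < PySem.List.len arr - 1 then
            let alr_met : Int := num + d
            if stored.contains alr_met then stored.insert num (stored.getD alr_met 0 + 1)
            else stored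
          else stored
        else
          if x < PySem.List.len arr - 1 then
            let alr_met : Int := num + d
            if stored.contains alr_met then stored.insert num (stored.getD alr_met 0 + 1)
            else stored
          else stored)
      PySem.Dict.empty = G d arr := by
  induction arr with
  | nil =>
    rw [show PySem.List.len ([] : List Int) - 1 = -1 by simp [PySem.List.len_eq]]
    rw [PySem.List.pyRange_neg_one_eq_nil (by omega)]
    rfl
  | cons a s ih =>
    have hlen : PySem.List.len (a :: s) = (s.length : Int) + 1 := by
      simp [PySem.List.len_eq]
    have hr : PySem.List.pyRange (PySem.List.len (a :: s) - 1) (-1) (-1)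
        = ((List.range s.length).map (fun k : Nat => (s.length : Int) - k)) ++ [(0 : Int)] := by
      rw [hlen, show ((s.length : Int) + 1 - 1) = (s.length : Int) by ring]
      rw [PySem.List.pyRange_neg_one]
      rw [show ((s.length : Int) - (-1)).toNat = s.length + 1 by omega]
      rw [List.range_succ, List.map_append]
      simp
    rw [hr, List.foldl_append]
    have inner : List.foldl (fun (stored : PySem.Dict Int Int) (x : Int) =>
          let num : Int := PySem.List.pyGetD (a :: s) x 0
          if !(stored.contains num) then
            let stored := stored.insert num 1
            if d == 0 then stored
            else if x < PySem.List.len (a :: s) - 1 then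
              let alr_met : Int := num + d
              if stored.contains alr_met then stored.insert num (stored.getD alr_met 0 + 1)
              else stored
            else stored
          else
            if x < PySem.List.len (a :: s) - 1 then
              let alr_met : Int := num + d
              if stored.contains alr_met then stored.insert num (stored.getD alr_met 0 + 1)
              else stored
            else stored)
        PySem.Dict.empty ((List.range s.length).map (fun k : Nat => (s.length : Int) - k))
        = G d s := by
      have step1 : List.foldl (fun (stored : PySem.Dict Int Int) (x : Int) =>
          let num : Int := PySem.List.pyGetD (a :: s) x 0
          if !(stored.contains num) then
            let stored := stored.insert num 1
            if d == 0 then stored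
            else if x < PySem.List.len (a :: s) - 1 then
              let alr_met : Int := num + d
              if stored.contains alr_met then stored.insert num (stored.getD alr_met 0 + 1)
              else stored
            else stored
          else
            if x < PySem.List.len (a :: s) - 1 then
              let alr_met : Int := num + d
              if stored.contains alr_met then stored.insert num (stored.getD alr_met 0 + 1)
              else stored
            else stored)
          PySem.Dict.empty ((List.range s.length).map (fun k : Nat => (s.length : Int) - k))
          = List.foldl (fun (stored : PySem.Dict Int Int) (x : Int) =>
          let num : Int := PySem.List.pyGetD s x 0
          if !(stored.contains num) then
            let stored := stored.insert num 1
            if d == 0 then stored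
            else if x < PySem.List.len s - 1 then
              let alr_met : Int := num + d
              if stored.contains alr_met then stored.insert num (stored.getD alr_met 0 + 1)
              else stored
            else stored
          else
            if x < PySem.List.len s - 1 then
              let alr_met : Int := num + d
              if stored.contains alr_met then stored.insert num (stored.getD alr_met 0 + 1)
              else stored
            else stored)
          PySem.Dict.empty ((List.range s.length).map (fun k : Nat => (s.length : Int) - 1 - k)) := by
        apply foldl_map_congr
        intro st k hk
        have hkm : k < s.length := List.mem_range.mp hk
        dsimp only
        have h1 : PySem.List.pyGetD (a :: s) ((s.length : Int) - (k : Int)) 0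
            = PySem.List.pyGetD s ((s.length : Int) - 1 - (k : Int)) 0 := by
          rw [show ((s.length : Int) - (k : Int)) = ((s.length - k : Nat) : Int) by omega]
          rw [show ((s.length : Int) - 1 - (k : Int)) = ((s.length - 1 - k : Nat) : Int) by omega]
          rw [PySem.List.pyGetD_natCast, PySem.List.pyGetD_natCast]
          rw [show s.length - k = (s.length - 1 - k) + 1 by omega]
          simp
        have h2 : ((s.length : Int) - (k : Int) < PySem.List.len (a :: s) - 1)
            ↔ ((s.length : Int) - 1 - (k : Int) < PySem.List.len s - 1) := by
          simp only [PySem.List.len_eq, List.length_cons]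
          constructor <;> intro h <;> [omega; omega]
        rw [h1]
        simp only [h2]
      have hr2 : (List.range s.length).map (fun k : Nat => (s.length : Int) - 1 - k)
          = PySem.List.pyRange (PySem.List.len s - 1) (-1) (-1) := by
        rw [PySem.List.pyRange_neg_one]
        rw [show (PySem.List.len s - 1 - (-1)).toNat = s.length by simp [PySem.List.len_eq]]
        apply List.map_congr_left
        intro k _
        simp [PySem.List.len_eq]
      rw [hr2] at step1
      exact step1.trans ih
    have hnum : PySem.List.pyGetD (a :: s) 0 0 = a := PySem.List.pyGetD_zero_cons ..
    have hg : ((0 : Int) < PySem.List.len (a :: s) - 1) ↔ (s ≠ []) := by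
      simp only [PySem.List.len_eq, List.length_cons]
      rw [← List.length_pos_iff]
      omega
    have outer : (fun (stored : PySem.Dict Int Int) (x : Int) =>
          let num : Int := PySem.List.pyGetD (a :: s) x 0
          if !(stored.contains num) then
            let stored := stored.insert num 1
            if d == 0 then stored
            else if x < PySem.List.len (a :: s) - 1 then
              let alr_met : Int := num + d
              if stored.contains alr_met then stored.insert num (stored.getD alr_met 0 + 1)
              else stored
            else stored
          else
            if x < PySem.List.len (a :: s) - 1 then
              let alr_met : Int := num + d
              if stored.contains alr_met then stored.insert num (stored.getD alr_met 0 + 1)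
              else stored
            else stored) (G d s) 0 = G d (a :: s) := by
      dsimp only
      rw [hnum]
      simp only [hg]
      rw [G]
      rfl
    exact (congrArg (fun st : PySem.Dict Int Int => (fun (stored : PySem.Dict Int Int) (x : Int) =>
          let num : Int := PySem.List.pyGetD (a :: s) x 0
          if !(stored.contains num) then
            let stored := stored.insert num 1
            if d == 0 then stored
            else if x < PySem.List.len (a :: s) - 1 then
              let alr_met : Int := num + d
              if stored.contains alr_met then stored.insert num (stored.getD alr_met 0 + 1)
              else stored
            else stored
          else
            if x < PySem.List.len (a :: s) - 1 then
              let alr_met : Int := num + d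
              if stored.contains alr_met then stored.insert num (stored.getD alr_met 0 + 1)
              else stored
            else stored) st 0) inner).trans outer

-- ---- B-side: successor pointers and per-index chain lengths ----

def firstIdx (l : List Int) (v : Int) : Option Nat :=
  match l with
  | [] => none
  | a :: s => if a = v then some 0 else (firstIdx s v).map (· + 1)

theorem firstIdx_lt (l : List Int) (v : Int) (k : Nat) (h : firstIdx l v = some k) :
    k < l.length ∧ l.getD k 0 = v := by
  induction l generalizing k with
  | nil => simp [firstIdx] at h
  | cons a s ih =>
    by_cases ha : a = v
    · simp [firstIdx, ha] at h
      subst h; simp [ha]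
    · simp only [firstIdx, ha, if_false, Option.map_eq_some_iff] at h
      obtain ⟨k', hk', rfl⟩ := h
      have := ih k' hk'
      simpa using this

def nextIdx (arr : List Int) (d : Int) (i : Nat) : Int :=
  match firstIdx (arr.drop (i + 1)) (arr.getD i 0 + d) with
  | some k => (i : Int) + 1 + (k : Int)
  | none => -1

def Inv1 (arr : List Int) (d : Int) (t : Nat) (st : List Int × PySem.Dict Int Int) : Prop :=
  t ≤ arr.length ∧ st.1.length = arr.length ∧
  (∀ i : Nat, t ≤ i → i < arr.length → st.1.getD i 0 = nextIdx arr d i) ∧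
  (∀ v : Int, st.2.get? v = (firstIdx (arr.drop t) v).map (fun k => ((t + k : Nat) : Int)))

theorem inv1_step (arr : List Int) (d : Int) (t : Nat) (st : List Int × PySem.Dict Int Int)
    (h : Inv1 arr d (t + 1) st) :
    Inv1 arr d t
      ((fun st (i : Int) =>
        let num : Int := PySem.List.pyGetD arr i 0
        (st.1.set i.toNat (st.2.getD (num + d) (-1)), st.2.insert num i)) st (t : Int)) := by
  obtain ⟨ht, hlen, hidx, hdict⟩ := h
  have htn : t < arr.length := by omega
  have hnum : PySem.List.pyGetD arr (t : Int) 0 = arr.getD t 0 := PySem.List.pyGetD_natCast ..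
  have hdrop : arr.drop t = arr.getD t 0 :: arr.drop (t + 1) := by
    rw [List.getD_eq_getElem arr 0 htn]
    exact List.drop_eq_getElem_cons htn
  have hj : st.2.getD (arr.getD t 0 + d) (-1) = nextIdx arr d t := by
    rw [PySem.Dict.getD_eq_get?_getD, hdict (arr.getD t 0 + d), nextIdx]
    cases hfi : firstIdx (arr.drop (t + 1)) (arr.getD t 0 + d) with
    | none => simp
    | some k =>
      simp only [Option.map_some, Option.getD_some]
      push_cast
      ring
  refine ⟨by omega, by simpa using hlen, ?_, ?_⟩
  · intro i hti hi
    simp only [hnum]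
    rw [Int.toNat_natCast]
    by_cases hit : i = t
    · subst hit
      rw [List.getD_eq_getElem?_getD, List.getElem?_set_self (by omega), Option.getD_some, hj]
    · rw [List.getD_eq_getElem?_getD, List.getElem?_set_ne (by omega),
        ← List.getD_eq_getElem?_getD]
      exact hidx i (by omega) hi
  · intro v
    simp only [hnum]
    rw [hdrop]
    by_cases hv : v = arr.getD t 0
    · subst hv
      rw [PySem.Dict.get?_insert_self]
      simp [firstIdx]
    · rw [PySem.Dict.get?_insert_of_ne _ _ hv, hdict v]
      have hne : ¬ (arr.getD t 0 = v) := fun hh => hv hh.symm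
      simp only [firstIdx, if_neg hne]
      cases hfi : firstIdx (arr.drop (t + 1)) v with
      | none => simp
      | some k =>
        simp only [Option.map_some, Option.getD_some]
        push_cast
        ring

theorem foldl_countdown {σ : Type} (f : σ → Int → σ) (P : Nat → σ → Prop)
    (step : ∀ (t : Nat) (s : σ), P (t + 1) s → P t (f s (t : Int))) :
    ∀ (t : Nat) (s : σ), P t s →
      P 0 ((PySem.List.pyRange ((t : Int) - 1) (-1) (-1)).foldl f s) := by
  intro t
  induction t with
  | zero =>
    intro s h
    rw [PySem.List.pyRange_neg_one_eq_nil (by omega)]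
    simpa using h
  | succ t ih =>
    intro s h
    rw [show ((t + 1 : Nat) : Int) - 1 = (t : Int) by push_cast; ring]
    rw [PySem.List.pyRange_neg_one_cons (by omega)]
    rw [List.foldl_cons]
    exact ih _ (step t s h)

theorem inv1_final (arr : List Int) (d : Int) :
    Inv1 arr d 0
      ((PySem.List.pyRange ((arr.length : Int) - 1) (-1) (-1)).foldl
        (fun st (i : Int) =>
          let num : Int := PySem.List.pyGetD arr i 0
          (st.1.set i.toNat (st.2.getD (num + d) (-1)), st.2.insert num i))
        (List.replicate arr.length (-1), PySem.Dict.empty)) := by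
  apply foldl_countdown _ (Inv1 arr d) (inv1_step arr d) arr.length
  refine ⟨le_rfl, by simp, fun i hi h2 => absurd h2 (by omega), fun v => ?_⟩
  rw [List.drop_length]
  simp [firstIdx, PySem.Dict.get?_empty]

theorem S_firstIdx (d : Int) (l : List Int) (v : Int) :
    S d l v = match firstIdx l v with
      | some k => S d (l.drop (k + 1)) (v + d) + 1
      | none => 0 := by
  induction l generalizing v with
  | nil => simp [S, firstIdx]
  | cons a s ih =>
    by_cases ha : a = v
    · simp [S, firstIdx, ha]
    · simp only [S, firstIdx, ha, if_false]
      rw [ih v]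
      cases h : firstIdx s v with
      | none => rfl
      | some k => simp

theorem S_cons_self (d a : Int) (l : List Int) : S d (a :: l) a = S d l (a + d) + 1 := by
  simp [S]

theorem S_suffix_le (d : Int) (l : List Int) (i : Nat) (v : Int) :
    S d (l.drop i) v ≤ S d l v := by
  by_cases hv : v ∈ l.drop i
  · obtain ⟨c, hs, hc, hh, hl⟩ := S_exists_chain d (l.drop i) v hv
    rw [← hl]
    exact S_ge_chain d l c v (hs.trans (List.drop_sublist i l)) hc hh
  · rw [S_eq_zero_of_not_mem d _ v hv]
    omega

theorem S_eq_drop (d : Int) (l : List Int) (v : Int) (hv : v ∈ l) :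
    ∃ i < l.length, l.getD i 0 = v ∧ S d l v = S d (l.drop i) v := by
  induction l with
  | nil => simp at hv
  | cons a s ih =>
    by_cases ha : a = v
    · exact ⟨0, by simp, by simpa using ha, by simp⟩
    · have hv' : v ∈ s := by cases hv with
        | head => exact absurd rfl ha
        | tail _ h => exact h
      obtain ⟨i, hi, hgi, hSi⟩ := ih hv'
      refine ⟨i + 1, by simpa using hi, by simpa using hgi, ?_⟩
      simpa [S, ha] using hSi

def Inv2 (arr : List Int) (d : Int) (t : Nat) (cl : List Int) : Prop :=
  t ≤ arr.length ∧ cl.length = arr.length ∧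
  ∀ i : Nat, t ≤ i → i < arr.length → cl.getD i 0 = (S d (arr.drop i) (arr.getD i 0) : Int)

theorem inv2_final (arr : List Int) (d : Int) (nxt : List Int)
    (hlen2 : nxt.length = arr.length)
    (hnxt : ∀ i : Nat, i < arr.length → nxt.getD i 0 = nextIdx arr d i) :
    Inv2 arr d 0
      ((PySem.List.pyRange ((arr.length : Int) - 1) (-1) (-1)).foldl
        (fun cl (i : Int) =>
          let j : Int := PySem.List.pyGetD nxt i (-1)
          cl.set i.toNat (1 + (if 0 ≤ j then PySem.List.pyGetD cl j 0 else 0)))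
        (List.replicate arr.length 0)) := by
  apply foldl_countdown _ (Inv2 arr d) _ arr.length
  · exact ⟨le_rfl, by simp, fun i hi h2 => absurd h2 (by omega)⟩
  · intro t cl h
    obtain ⟨ht, hlen, hval⟩ := h
    have htn : t < arr.length := by omega
    -- the pointer read at index t
    have hj0 : PySem.List.pyGetD nxt (t : Int) (-1) = nextIdx arr d t := by
      rw [PySem.List.pyGetD_natCast]
      rw [List.getD_eq_getElem?_getD, List.getElem?_eq_getElem (by omega), Option.getD_some]
      have h := hnxt t htn
      rwa [List.getD_eq_getElem?_getD, List.getElem?_eq_getElem (by omega), Option.getD_some] at h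
    refine ⟨by omega, by simpa using hlen, ?_⟩
    intro i hti hi
    dsimp only
    rw [Int.toNat_natCast]
    by_cases hit : t = i
    · subst hit
      rw [List.getD_eq_getElem?_getD, List.getElem?_set_self (by omega), Option.getD_some, hj0]
      have hdrop : arr.drop t = arr.getD t 0 :: arr.drop (t + 1) := by
        rw [List.getD_eq_getElem arr 0 htn]
        exact List.drop_eq_getElem_cons htn
      unfold nextIdx
      cases hfi : firstIdx (arr.drop (t + 1)) (arr.getD t 0 + d) with
      | none =>
        simp only
        rw [if_neg (by omega), hdrop, S_cons_self, S_firstIdx d (arr.drop (t + 1)) _, hfi]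
        simp
      | some k =>
        simp only
        obtain ⟨hklt, hkv⟩ := firstIdx_lt _ _ _ hfi
        have hklt' : t + 1 + k < arr.length := by
          rw [List.length_drop] at hklt; omega
        rw [if_pos (by positivity)]
        rw [show (t : Int) + 1 + (k : Int) = ((t + 1 + k : Nat) : Int) by push_cast; ring,
          PySem.List.pyGetD_natCast]
        rw [hval (t + 1 + k) (by omega) hklt']
        have hgd : arr.getD (t + 1 + k) 0 = arr.getD t 0 + d := by
          rw [List.getD_eq_getElem _ 0 hklt] at hkv
          rw [List.getElem_drop] at hkv
          rw [List.getD_eq_getElem _ 0 hklt']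
          exact hkv
        have htail : (arr.drop (t + 1)).drop (k + 1) = arr.drop (t + 1 + k + 1) := by
          rw [List.drop_drop]; congr 1
        have hdd : arr.drop (t + 1 + k) = (arr.getD t 0 + d) :: ((arr.drop (t + 1)).drop (k + 1)) := by
          rw [List.drop_eq_getElem_cons hklt', htail]
          congr 1
          rw [← List.getD_eq_getElem _ 0 hklt']
          exact hgd
        rw [hgd, hdd, S_cons_self]
        rw [hdrop, S_cons_self, S_firstIdx d (arr.drop (t + 1)) (arr.getD t 0 + d), hfi]
        push_cast
        ring
    · rw [List.getD_eq_getElem?_getD, List.getElem?_set_ne hit, ← List.getD_eq_getElem?_getD]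
      exact hval i (by omega) hi

theorem max?_getD_eq (l1 l2 : List Int) (h1 : l1 ≠ []) (h2 : l2 ≠ [])
    (c12 : ∀ x ∈ l1, ∃ y ∈ l2, x ≤ y) (c21 : ∀ y ∈ l2, ∃ x ∈ l1, y ≤ x) :
    (PySem.List.max? l1 (fun v => v)).getD 0 = (PySem.List.max? l2 (fun v => v)).getD 0 := by
  cases hm1 : PySem.List.max? l1 (fun v => v) with
  | none => exact absurd ((PySem.List.max?_eq_none_iff l1 (fun v => v)).mp hm1) h1
  | some m1 =>
    cases hm2 : PySem.List.max? l2 (fun v => v) with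
    | none => exact absurd ((PySem.List.max?_eq_none_iff l2 (fun v => v)).mp hm2) h2
    | some m2 =>
      simp only [Option.getD_some]
      obtain ⟨y, hy, hy2⟩ := c12 m1 (PySem.List.max?_mem hm1)
      obtain ⟨x, hx, hx2⟩ := c21 m2 (PySem.List.max?_mem hm2)
      have h12 : m1 ≤ m2 := le_trans hy2 (PySem.List.max?_isMax hm2 y hy)
      have h21 : m2 ≤ m1 := le_trans hx2 (PySem.List.max?_isMax hm1 x hx)
      omega

/-- The key comparison: the max of A's per-value greedy lengths equals the max of B's
per-index chain lengths. -/
theorem final_max_eq (arr : List Int) (d : Int) (hpre : arr ≠ []) (clen : List Int)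
    (hlen2 : clen.length = arr.length)
    (hval : ∀ i : Nat, i < arr.length → clen.getD i 0 = (S d (arr.drop i) (arr.getD i 0) : Int)) :
    (PySem.List.max? (Hdp d arr).values (fun v => v)).getD 0
      = (PySem.List.max? clen (fun v => v)).getD 0 := by
  rw [PySem.Dict.values_eq_map_keys _ (Hdp_nodup d arr) 0]
  obtain ⟨a0, ha0⟩ := List.exists_mem_of_ne_nil arr hpre
  have hn0 : 0 < arr.length := List.length_pos_of_mem ha0
  apply max?_getD_eq
  · simp only [ne_eq, List.map_eq_nil_iff]
    intro hk
    have := (Hdp_mem_keys d arr a0).mpr ha0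
    rw [hk] at this; simp at this
  · intro hk
    rw [hk] at hlen2
    simp at hlen2
    omega
  · -- every stored chain length is realized at the first index of its key
    intro x hx
    obtain ⟨v, hvk, hxv⟩ := List.mem_map.mp hx
    have hv : v ∈ arr := (Hdp_mem_keys d arr v).mp hvk
    obtain ⟨i, hi, hgi, hSi⟩ := S_eq_drop d arr v hv
    refine ⟨clen[i]'(by omega), List.getElem_mem _, ?_⟩
    have hci : clen[i]'(by omega) = clen.getD i 0 := by
      rw [List.getD_eq_getElem?_getD, List.getElem?_eq_getElem (by omega), Option.getD_some]
    rw [hci, hval i hi, ← hxv, Hdp_getD, hgi, hSi]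
  · -- every per-index chain length is bounded by the stored length of its value
    intro y hy
    obtain ⟨i, hi, hyc⟩ := List.mem_iff_getElem.mp hy
    have hin : i < arr.length := by omega
    have hci : y = clen.getD i 0 := by
      rw [List.getD_eq_getElem?_getD, List.getElem?_eq_getElem (by omega), Option.getD_some, hyc]
    refine ⟨(Hdp d arr).getD (arr.getD i 0) 0,
      List.mem_map.mpr ⟨arr.getD i 0, ?_, rfl⟩, ?_⟩
    · rw [Hdp_mem_keys]
      rw [List.getD_eq_getElem _ 0 hin]
      exact List.getElem_mem _
    · rw [hci, hval i hin, Hdp_getD]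
      exact_mod_cast S_suffix_le d arr i (arr.getD i 0)

-- ===== VERDICT (by name: the statement is the Claim_ definition above) =====
theorem longest_subsequence_length_spec : Claim_equal_longest_subsequence_length := by
  unfold Claim_equal_longest_subsequence_length
  intro arr d _ hpre
  unfold Pre_longest_subsequence_length at hpre
  unfold Spec_longest_subsequence_length
  have hA : longest_subsequence_length arr d
      = (PySem.List.max? (Hdp d arr).values (fun v => v)).getD 0 := by
    unfold longest_subsequence_length
    rw [fold_eq_G, G_eq_H]
  have hB : longest_subsequence_length_alt arr d
      = (PySem.List.max?
          ((PySem.List.pyRange ((arr.length : Int) - 1) (-1) (-1)).foldl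
            (fun cl (i : Int) =>
              let j : Int := PySem.List.pyGetD
                ((PySem.List.pyRange ((arr.length : Int) - 1) (-1) (-1)).foldl
                  (fun st (i : Int) =>
                    let num : Int := PySem.List.pyGetD arr i 0
                    (st.1.set i.toNat (st.2.getD (num + d) (-1)), st.2.insert num i))
                  (List.replicate arr.length (-1), PySem.Dict.empty)).1 i (-1)
              cl.set i.toNat (1 + (if 0 ≤ j then PySem.List.pyGetD cl j 0 else 0)))
            (List.replicate arr.length 0)) (fun v => v)).getD 0 := by
    unfold longest_subsequence_length_alt
    simp only [PySem.List.len_eq]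
  obtain ⟨-, hlen1, hidx, -⟩ := inv1_final arr d
  obtain ⟨-, hlen2, hval⟩ := inv2_final arr d _ hlen1 (fun i hi => hidx i (Nat.zero_le i) hi)
  rw [hA, hB]
  exact final_max_eq arr d hpre _ hlen2 (fun i hi => hval i (Nat.zero_le i) hi)
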